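-- pv_equiv track=rewrite | github.com/ianabc/vitale | vitale.py | vitaleproperty
-- ===== SOURCE A (Python) =====
-- def vitaleproperty(n):
--     if n == 2:
--         return range(10, 99, 2)
--     else:
--         vnums = []
--         for vnum in vitaleproperty(n-1):
--             vnum = vnum * 10
--             for j in range(10):
--                 if ((vnum + j) % n == 0):
--                     vnums.append(vnum + j)
--
--         return vnums
-- ===== SOURCE B (Python) =====
-- def vitaleproperty(n):
--     if n == 2:
--         return range(10, 99, 2)
--     nums = list(range(10, 99, 2))
--     for m in range(3, n + 1):
--         nums = [10 * v + j for v in nums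
--                 for j in range((-10 * v) % m, 10, m)]
--     return nums
-- ===== Notes on version B (the rewrite author's own statement) =====
-- stated objective: faster
-- what changed: B replaces A's recursion and its ten-digit divisibility scan by an iterative bottom-up loop over the moduli 3..n that rebuilds the whole level with a flat comprehension, computing the valid digits in closed form via j0 = (-10*v) % m and a stride-m range instead of testing all ten digits.
import Mathlib
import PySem

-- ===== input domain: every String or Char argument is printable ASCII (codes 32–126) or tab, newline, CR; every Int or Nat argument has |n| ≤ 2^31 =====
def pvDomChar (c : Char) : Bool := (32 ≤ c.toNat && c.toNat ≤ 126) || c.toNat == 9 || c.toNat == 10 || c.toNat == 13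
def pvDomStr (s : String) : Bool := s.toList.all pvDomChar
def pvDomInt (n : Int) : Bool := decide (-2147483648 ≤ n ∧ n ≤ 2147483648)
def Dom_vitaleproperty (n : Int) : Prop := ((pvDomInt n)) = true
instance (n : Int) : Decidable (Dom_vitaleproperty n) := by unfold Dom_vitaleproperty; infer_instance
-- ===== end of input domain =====

-- B is an iterative bottom-up rebuild (a loop over the moduli 3..n, each level a flat
-- comprehension using the closed-form first digit (-10*v) % m and a stride-m range) replacing
-- A's recursion with its ten-digit divisibility scan; the lists are proved equal for n ≥ 2.

-- ===== PORT A =====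
-- Recursion of A realised on the fuel (n - 2).toNat; level k computes digit count k + 2, so the
-- modulus used at level k + 1 is (k : Int) + 3.
def vitalePyAuxA : Nat → List Int
  | 0 => PySem.List.pyRange 10 99 2
  | k + 1 =>
      (vitalePyAuxA k).foldl
        (fun vnums vnum =>
          (PySem.List.pyRange 0 10 1).foldl
            (fun vnums j =>
              if PySem.Int.mod (vnum * 10 + j) ((k : Int) + 3) = 0 then vnums ++ [vnum * 10 + j]
              else vnums)
            vnums)
        []

-- For n < 2 the Python recurses forever and dies with RecursionError; the [] is only a totality
-- guard, those inputs are excluded by Pre_.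
def vitaleproperty (n : Int) : List Int :=
  if n < 2 then [] else vitalePyAuxA (n - 2).toNat

-- ===== PORT B =====
def vitaleproperty_alt (n : Int) : List Int :=
  if n = 2 then PySem.List.pyRange 10 99 2
  else
    (PySem.List.pyRange 3 (n + 1) 1).foldl
      (fun nums m =>
        nums.flatMap (fun v =>
          (PySem.List.pyRange (PySem.Int.mod (-(10 * v)) m) 10 m).map (fun j => 10 * v + j)))
      (PySem.List.pyRange 10 99 2)

-- ===== PRECONDITION & SPEC =====
-- Pre_ excludes n < 2, where the Python recursion never reaches its base case (RecursionError).
def Pre_vitaleproperty (n : Int) : Prop := 2 ≤ n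
instance (n : Int) : Decidable (Pre_vitaleproperty n) := by unfold Pre_vitaleproperty; infer_instance
def pvWitness_vitaleproperty : Int := (5)

def Spec_vitaleproperty (n : Int) (out : List Int) : Prop := out = vitaleproperty_alt n
instance (n : Int) (out : List Int) : Decidable (Spec_vitaleproperty n out) := by unfold Spec_vitaleproperty; infer_instance

-- ===== CLAIM (what is proved, stated in full; the proofs are below) =====
def Claim_equal_vitaleproperty : Prop := ∀ (n : Int), Dom_vitaleproperty n → Pre_vitaleproperty n → Spec_vitaleproperty n (vitaleproperty n)

-- ===== LEMMAS AND PROOFS =====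

-- A's inner loop appends base + j for every digit j passing the divisibility test.
lemma innerA_eq (n base : Int) (l : List Int) (acc : List Int) :
    l.foldl (fun vnums j => if PySem.Int.mod (base + j) n = 0 then vnums ++ [base + j] else vnums) acc
      = acc ++ (l.filter (fun j => decide (PySem.Int.mod (base + j) n = 0))).map (fun j => base + j) := by
  induction l generalizing acc with
  | nil => simp
  | cons x xs ih =>
      simp only [List.foldl_cons, List.filter_cons]
      by_cases h : PySem.Int.mod (base + x) n = 0
      · simp [h, ih]
      · simp [h, ih]

-- The modulus divides base + j0 where j0 = (-base) % n.
lemma dvd_base_add_mod (n base : Int) (hn : 0 < n) :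
    n ∣ base + PySem.Int.mod (-base) n := by
  rw [PySem.Int.mod_eq_emod_of_pos hn, Int.emod_def]
  exact ⟨-((-base) / n), by ring⟩

-- Membership characterisation: the digits A keeps are exactly the stride-n range B walks.
lemma mem_filter_iff_mem_range (n base x : Int) (hn : 0 < n) :
    (x ∈ (PySem.List.pyRange 0 10 1).filter (fun j => decide (PySem.Int.mod (base + j) n = 0)))
      ↔ x ∈ PySem.List.pyRange (PySem.Int.mod (-base) n) 10 n := by
  have h0 : 0 ≤ PySem.Int.mod (-base) n := PySem.Int.mod_nonneg _ hn
  have h1 : PySem.Int.mod (-base) n < n := PySem.Int.mod_lt _ hn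
  have hd : n ∣ base + PySem.Int.mod (-base) n := dvd_base_add_mod n base hn
  rw [List.mem_filter, PySem.List.mem_pyRange_one, PySem.List.mem_pyRange_iff_of_pos hn,
    decide_eq_true_eq, PySem.Int.mod_eq_zero_iff_dvd]
  constructor
  · rintro ⟨⟨hx0, hx10⟩, hdvd⟩
    have hsub : n ∣ x - PySem.Int.mod (-base) n := by
      have := dvd_sub hdvd hd
      simpa using this
    refine ⟨?_, hx10, hsub⟩
    rcases hsub with ⟨t, ht⟩
    by_contra hlt
    push Not at hlt
    have ht1 : t ≤ -1 := by
      by_contra ht0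
      push Not at ht0
      have : 0 ≤ t := by omega
      have : 0 ≤ n * t := mul_nonneg hn.le this
      omega
    have : n * t ≤ n * (-1) := mul_le_mul_of_nonneg_left ht1 hn.le
    omega
  · rintro ⟨hj0, hx10, hsub⟩
    refine ⟨⟨by omega, hx10⟩, ?_⟩
    have := dvd_add hsub hd
    have h : x - PySem.Int.mod (-base) n + (base + PySem.Int.mod (-base) n) = base + x := by ring
    rwa [h] at this

-- B's range is strictly increasing.
lemma pairwise_lt_pyRange_of_pos (a b s : Int) (hs : 0 < s) :
    List.Pairwise (· < ·) (PySem.List.pyRange a b s) := by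
  rw [PySem.List.pyRange_of_pos a b hs]
  refine List.Pairwise.map _ ?_ List.pairwise_lt_range
  intro k k' hkk'
  have : (k : Int) < (k' : Int) := by exact_mod_cast hkk'
  have := mul_lt_mul_of_pos_left this hs
  omega

-- The filtered digit list IS B's range: same members, both strictly ascending.
lemma filter_eq_pyRange (n base : Int) (hn : 0 < n) :
    (PySem.List.pyRange 0 10 1).filter (fun j => decide (PySem.Int.mod (base + j) n = 0))
      = PySem.List.pyRange (PySem.Int.mod (-base) n) 10 n := by
  have hpl : List.Pairwise (· < ·)
      ((PySem.List.pyRange 0 10 1).filter (fun j => decide (PySem.Int.mod (base + j) n = 0))) :=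
    List.Pairwise.sublist List.filter_sublist (PySem.List.pairwise_lt_pyRange_one 0 10)
  have hpr : List.Pairwise (· < ·) (PySem.List.pyRange (PySem.Int.mod (-base) n) 10 n) :=
    pairwise_lt_pyRange_of_pos _ _ _ hn
  have hnl : ((PySem.List.pyRange 0 10 1).filter
      (fun j => decide (PySem.Int.mod (base + j) n = 0))).Nodup :=
    hpl.imp (fun h => ne_of_lt h)
  have hnr : (PySem.List.pyRange (PySem.Int.mod (-base) n) 10 n).Nodup :=
    hpr.imp (fun h => ne_of_lt h)
  have hperm := (List.perm_ext_iff_of_nodup hnl hnr).2 (fun x => mem_filter_iff_mem_range n base x hn)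
  exact hperm.eq_of_pairwise (fun a b _ _ hab hba => le_antisymm hab hba)
    (hpl.imp le_of_lt) (hpr.imp le_of_lt)

-- One recursive level of A IS the flat comprehension B builds with modulus k + 3.
lemma levelA_eq_flatMap (k : Nat) :
    vitalePyAuxA (k + 1)
      = (vitalePyAuxA k).flatMap (fun v =>
          (PySem.List.pyRange (PySem.Int.mod (-(10 * v)) ((k : Int) + 3)) 10 ((k : Int) + 3)).map
            (fun j => 10 * v + j)) := by
  show (vitalePyAuxA k).foldl _ [] = _
  have hn : (0 : Int) < (k : Int) + 3 := by positivity
  have hf : (fun (vnums : List Int) (vnum : Int) =>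
      (PySem.List.pyRange 0 10 1).foldl
        (fun vnums j =>
          if PySem.Int.mod (vnum * 10 + j) ((k : Int) + 3) = 0 then vnums ++ [vnum * 10 + j]
          else vnums) vnums)
      = (fun (vnums : List Int) (vnum : Int) =>
          vnums ++ (PySem.List.pyRange (PySem.Int.mod (-(10 * vnum)) ((k : Int) + 3)) 10
            ((k : Int) + 3)).map (fun j => 10 * vnum + j)) := by
    funext acc v
    rw [innerA_eq ((k : Int) + 3) (v * 10), filter_eq_pyRange _ _ hn, mul_comm v (10 : Int)]
  rw [hf, PySem.List.foldl_append_eq_flatMap]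
  simp

-- B's loop, run over the moduli 3 .. k + 2, reaches exactly A's level k.
lemma loopB_eq_auxA : ∀ k : Nat,
    (PySem.List.pyRange 3 ((k : Int) + 3) 1).foldl
        (fun nums m =>
          nums.flatMap (fun v =>
            (PySem.List.pyRange (PySem.Int.mod (-(10 * v)) m) 10 m).map (fun j => 10 * v + j)))
        (PySem.List.pyRange 10 99 2)
      = vitalePyAuxA k
  | 0 => by rw [PySem.List.pyRange_one_eq_nil (by norm_num)]; rfl
  | k + 1 => by
      have h1 : (((k + 1 : Nat) : Int) + 3) = ((k : Int) + 3) + 1 := by push_cast; ring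
      rw [h1, PySem.List.pyRange_one_succ_right (by omega), List.foldl_append,
        loopB_eq_auxA k]
      simp only [List.foldl_cons, List.foldl_nil]
      exact (levelA_eq_flatMap k).symm

-- ===== VERDICT (by name: the statement is the Claim_ definition above) =====
theorem vitaleproperty_spec : Claim_equal_vitaleproperty := by
  intro n _ hpre
  have h2 : 2 ≤ n := hpre
  unfold Spec_vitaleproperty vitaleproperty vitaleproperty_alt
  rw [if_neg (by omega : ¬ n < 2)]
  by_cases he : n = 2
  · subst he; rfl
  · rw [if_neg he, show n + 1 = (((n - 2).toNat : Int) + 3) by omega]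
    exact (loopB_eq_auxA (n - 2).toNat).symm
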